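-- pv_equiv track=rewrite | github.com/INEO-ZHANG/otto | src/itemcf.py | unique_recent_events
-- ===== SOURCE A (Python) =====
-- from typing import Dict, Iterator, List, Optional, Sequence, Tuple
--
-- Event = Tuple[int, int, int]
--
-- def unique_recent_events(events: Sequence[Event], limit: int) -> List[Event]:
--     seen = set()
--     output: List[Event] = []
--     for aid, ts, event_type in reversed(events):
--         if aid in seen:
--             continue
--         seen.add(aid)
--         output.append((aid, ts, event_type))
--         if len(output) >= limit:
--             break
--     return output
-- ===== SOURCE B (Python) =====
-- from typing import Dict, List, Sequence, Tuple
--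
-- Event = Tuple[int, int, int]
--
-- def unique_recent_events(events: Sequence[Event], limit: int) -> List[Event]:
--     latest: Dict[int, Event] = {}
--     for aid, ts, event_type in events:
--         latest.pop(aid, None)
--         latest[aid] = (aid, ts, event_type)
--     output: List[Event] = []
--     for event in reversed(latest.values()):
--         if len(output) >= limit:
--             break
--         output.append(event)
--     return output
-- ===== Notes on version B (the rewrite author's own statement) =====
-- stated objective: alternative
-- what changed: Instead of scanning the events in reverse with a seen-set and breaking after appending, B makes one forward pass keeping a dict of each aid's latest event ordered by last occurrence (pop-then-reinsert), then fills the output from the reversed dict values while it is shorter than limit.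
-- intended difference: On nonempty event lists with limit <= 0, A returns one event because it appends before checking the limit, while B returns the empty list, which is the intended meaning of a non-positive limit. — e.g. on unique_recent_events([(1, 2, 3)], 0): A returns [(1, 2, 3)], B returns []
import Mathlib
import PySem

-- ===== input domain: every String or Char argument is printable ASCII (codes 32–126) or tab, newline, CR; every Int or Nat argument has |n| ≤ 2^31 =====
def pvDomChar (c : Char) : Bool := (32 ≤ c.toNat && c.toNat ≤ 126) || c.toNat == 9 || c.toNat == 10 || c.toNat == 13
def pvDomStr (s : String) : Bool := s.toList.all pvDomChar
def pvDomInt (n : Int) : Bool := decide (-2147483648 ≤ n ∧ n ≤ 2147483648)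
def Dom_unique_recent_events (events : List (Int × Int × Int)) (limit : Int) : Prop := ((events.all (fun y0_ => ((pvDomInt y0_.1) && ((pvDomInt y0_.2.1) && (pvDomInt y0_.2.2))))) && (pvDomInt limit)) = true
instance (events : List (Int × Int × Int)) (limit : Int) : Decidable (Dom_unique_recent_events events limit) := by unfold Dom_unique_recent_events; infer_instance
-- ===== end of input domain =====

-- B replaces A's reverse scan with seen-set and post-append break by a forward pass keeping a
-- dict of each aid's latest event ordered by last occurrence, then filling the output from the
-- reversed dict values while it is shorter than limit (alternative of the same cost, not faster).

-- ===== PORT A =====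
-- the 'for … in reversed(events)' loop: 'continue' = recurse with unchanged state, 'break' = return output
def ureLoop : List (Int × Int × Int) → PySem.Set Int → List (Int × Int × Int) → Int → List (Int × Int × Int)
  | [], _, output, _ => output
  | (aid, ts, event_type) :: rest, seen, output, limit =>
    if PySem.Set.contains seen aid then
      ureLoop rest seen output limit
    else
      let output' := output ++ [(aid, ts, event_type)]
      if (output'.length : Int) ≥ limit then output'
      else ureLoop rest (PySem.Set.add seen aid) output' limit

def unique_recent_events (events : List (Int × Int × Int)) (limit : Int) : List (Int × Int × Int) :=
  ureLoop events.reverse PySem.Set.empty [] limit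

-- ===== PORT B =====
-- loop body: 'latest.pop(aid, None)' then 'latest[aid] = (aid, ts, event_type)'
def ureStep (latest : PySem.Dict Int (Int × Int × Int)) (e : Int × Int × Int) : PySem.Dict Int (Int × Int × Int) :=
  (latest.erase e.1).insert e.1 e

-- 'for event in reversed(latest.values()): if len(output) >= limit: break; output.append(event)'
def ureTake : List (Int × Int × Int) → List (Int × Int × Int) → Int → List (Int × Int × Int)
  | [], output, _ => output
  | e :: rest, output, limit =>
    if (output.length : Int) ≥ limit then output
    else ureTake rest (output ++ [e]) limit

def unique_recent_events_alt (events : List (Int × Int × Int)) (limit : Int) : List (Int × Int × Int) :=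
  let latest := events.foldl ureStep PySem.Dict.empty
  ureTake latest.values.reverse [] limit

-- ===== PRECONDITION & SPEC =====
-- On nonempty event lists with limit <= 0, A returns one event because it appends before
-- checking the limit, while B returns the empty list, which is the intended meaning of a
-- non-positive limit.
def D_unique_recent_events (events : List (Int × Int × Int)) (limit : Int) : Prop :=
  events ≠ [] ∧ limit ≤ 0
instance (events : List (Int × Int × Int)) (limit : Int) : Decidable (D_unique_recent_events events limit) := by unfold D_unique_recent_events; infer_instance

def Spec_unique_recent_events (events : List (Int × Int × Int)) (limit : Int) (out : List (Int × Int × Int)) : Prop := ¬ D_unique_recent_events events limit → out = unique_recent_events_alt events limit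
instance (events : List (Int × Int × Int)) (limit : Int) (out : List (Int × Int × Int)) : Decidable (Spec_unique_recent_events events limit out) := by unfold Spec_unique_recent_events; infer_instance

def pvDiffWitness_unique_recent_events : (List (Int × Int × Int)) × Int := ([(1, 2, 3)], 0)
def pvDiffWitnessOut_unique_recent_events : (List (Int × Int × Int)) × (List (Int × Int × Int)) := ([(1, 2, 3)], [])

-- ===== CLAIM (what is proved, stated in full; the proofs are below) =====
def Claim_unchanged_unique_recent_events : Prop := ∀ (events : List (Int × Int × Int)) (limit : Int), Dom_unique_recent_events events limit → Spec_unique_recent_events events limit (unique_recent_events events limit)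
def Claim_changed_unique_recent_events : Prop := Dom_unique_recent_events (pvDiffWitness_unique_recent_events.1) (pvDiffWitness_unique_recent_events.2) ∧ D_unique_recent_events (pvDiffWitness_unique_recent_events.1) (pvDiffWitness_unique_recent_events.2) ∧ unique_recent_events (pvDiffWitness_unique_recent_events.1) (pvDiffWitness_unique_recent_events.2) = pvDiffWitnessOut_unique_recent_events.1 ∧ unique_recent_events_alt (pvDiffWitness_unique_recent_events.1) (pvDiffWitness_unique_recent_events.2) = pvDiffWitnessOut_unique_recent_events.2 ∧ pvDiffWitnessOut_unique_recent_events.1 ≠ pvDiffWitnessOut_unique_recent_events.2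
def Claim_exact_unique_recent_events : Prop := ∀ (events : List (Int × Int × Int)) (limit : Int), Dom_unique_recent_events events limit → D_unique_recent_events events limit → unique_recent_events events limit ≠ unique_recent_events_alt events limit

-- ===== LEMMAS AND PROOFS =====

-- proof-only spec: first occurrence of each aid (not in `seen`) while scanning l
def ded : List (Int × Int × Int) → List Int → List (Int × Int × Int)
  | [], _ => []
  | y :: rest, seen =>
    if y.1 ∈ seen then ded rest seen
    else y :: ded rest (y.1 :: seen)

theorem ded_congr (l : List (Int × Int × Int)) (S S' : List Int)
    (h : ∀ k, k ∈ S ↔ k ∈ S') : ded l S = ded l S' := by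
  induction l generalizing S S' with
  | nil => rfl
  | cons y rest ih =>
    by_cases hy : y.1 ∈ S
    · simp [ded, hy, (h y.1).mp hy, ih _ _ h]
    · have hy' : y.1 ∉ S' := fun c => hy ((h y.1).mpr c)
      simp only [ded, if_neg hy, if_neg hy']
      exact congrArg (y :: ·) (ih _ _ (by intro k; simp [h k]))

theorem mem_ded (l : List (Int × Int × Int)) (S : List Int) (y : Int × Int × Int)
    (h : y ∈ ded l S) : y.1 ∉ S := by
  induction l generalizing S with
  | nil => simp [ded] at h
  | cons x rest ih =>
    by_cases hx : x.1 ∈ S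
    · exact ih _ (by simpa [ded, hx] using h)
    · simp only [ded, if_neg hx, List.mem_cons] at h
      rcases h with h | h
      · subst h; exact hx
      · have := ih _ h; intro c; exact this (List.mem_cons_of_mem _ c)

theorem ded_add (l : List (Int × Int × Int)) (S : List Int) (a : Int) :
    ded l (a :: S) = (ded l S).filter (fun y => !(y.1 == a)) := by
  induction l generalizing S with
  | nil => rfl
  | cons y rest ih =>
    by_cases h1 : y.1 ∈ S
    · have hm : y.1 ∈ a :: S := List.mem_cons_of_mem _ h1
      simp only [ded, if_pos h1, if_pos hm]
      exact ih S
    · by_cases h2 : y.1 = a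
      · have hm : y.1 ∈ a :: S := by simp [h2]
        have e1 : ded (y :: rest) (a :: S) = ded rest (a :: S) := by simp [ded, hm]
        have e2 : ded (y :: rest) S = y :: ded rest (y.1 :: S) := by simp [ded, h1]
        rw [e1, e2, List.filter_cons_of_neg (by simp [h2])]
        rw [h2, List.filter_eq_self.mpr]
        intro x hx
        have hnm := mem_ded _ _ _ hx
        simp only [List.mem_cons, not_or] at hnm
        simp [hnm.1]
      · have hm : y.1 ∉ a :: S := by simp [h1, Ne.symm, h2]
        have e1 : ded (y :: rest) (a :: S) = y :: ded rest (y.1 :: a :: S) := by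
          simp [ded, hm]
        have e2 : ded (y :: rest) S = y :: ded rest (y.1 :: S) := by simp [ded, h1]
        rw [e1, e2, List.filter_cons_of_pos (by simp [h2])]
        rw [ded_congr rest (y.1 :: a :: S) (a :: y.1 :: S) (by intro k; constructor <;> (intro hh; simp at hh ⊢; tauto))]
        rw [ih (y.1 :: S)]

theorem ureLoop_eq (l : List (Int × Int × Int)) (seen : PySem.Set Int)
    (out : List (Int × Int × Int)) (limit : Int) :
    ureLoop l seen out limit
      = out ++ (ded l seen).take (max 1 (limit - out.length)).toNat := by
  induction l generalizing seen out with
  | nil => simp [ureLoop, ded]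
  | cons y rest ih =>
    obtain ⟨a, t, e⟩ := y
    by_cases hs : a ∈ seen
    · have e1 : ureLoop ((a, t, e) :: rest) seen out limit = ureLoop rest seen out limit := by
        simp [ureLoop, PySem.Set.contains, hs]
      rw [e1, ih]
      simp [ded, hs]
    · have hc : PySem.Set.contains seen a = false := by
        simp [PySem.Set.contains, hs]
      have eded : ded ((a, t, e) :: rest) seen = (a, t, e) :: ded rest (a :: seen) := by
        simp [ded, hs]
      by_cases hl : ((out.length + 1 : Int)) ≥ limit
      · have e1 : ureLoop ((a, t, e) :: rest) seen out limit = out ++ [(a, t, e)] := by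
          simp only [ureLoop, hc, Bool.false_eq_true, if_false, List.length_append,
            List.length_cons, List.length_nil]
          rw [if_pos (by push_cast; omega)]
        have hn : (max 1 (limit - out.length)).toNat = 1 := by omega
        rw [e1, eded, hn]
        simp
      · have e1 : ureLoop ((a, t, e) :: rest) seen out limit
            = ureLoop rest (PySem.Set.add seen a) (out ++ [(a, t, e)]) limit := by
          simp only [ureLoop, hc, Bool.false_eq_true, if_false, List.length_append,
            List.length_cons, List.length_nil]
          rw [if_neg (by push_cast at hl ⊢; omega)]
        rw [e1, ih, eded]
        rw [ded_congr rest (PySem.Set.add seen a) (a :: seen) (by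
          intro k
          rw [PySem.Set.mem_add]
          simp [or_comm])]
        have hn : (max 1 (limit - out.length)).toNat
            = (max 1 (limit - ((out ++ [(a, t, e)]).length : Int))).toNat + 1 := by
          simp only [List.length_append, List.length_cons, List.length_nil]
          push_cast at hl ⊢
          omega
        rw [hn, List.take_succ_cons]
        simp

theorem ureTake_eq (l : List (Int × Int × Int)) (out : List (Int × Int × Int)) (limit : Int) :
    ureTake l out limit = out ++ l.take (limit - out.length).toNat := by
  induction l generalizing out with
  | nil => simp [ureTake]
  | cons e rest ih =>
    by_cases hl : ((out.length : Int)) ≥ limit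
    · have hn : (limit - (out.length : Int)).toNat = 0 := by omega
      simp [ureTake, if_pos hl, hn]
    · have e1 : ureTake (e :: rest) out limit = ureTake rest (out ++ [e]) limit := by
        simp [ureTake, if_neg hl]
      rw [e1, ih]
      have hn : (limit - (out.length : Int)).toNat
          = (limit - ((out ++ [e]).length : Int)).toNat + 1 := by
        simp only [List.length_append, List.length_cons, List.length_nil]
        push_cast at hl ⊢
        omega
      rw [hn, List.take_succ_cons]
      simp

theorem items_ureStep (d : PySem.Dict Int (Int × Int × Int)) (e : Int × Int × Int) :
    (ureStep d e).items = d.items.filter (fun p => !(p.1 == e.1)) ++ [(e.1, e)] := by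
  unfold ureStep
  have hnc : (d.erase e.1).contains e.1 = false := by
    simp [PySem.Dict.contains, PySem.Dict.erase, List.any_filter]
  rw [PySem.Dict.items_insert_of_not_contains _ _ hnc]
  rfl

theorem foldl_ureStep_items (es : List (Int × Int × Int))
    (d : PySem.Dict Int (Int × Int × Int)) :
    (es.foldl ureStep d).items
      = d.items.filter (fun p => !((es.map (·.1)).contains p.1))
        ++ ((ded es.reverse []).reverse).map (fun y => (y.1, y)) := by
  induction es using List.reverseRecOn with
  | nil => simp [ded]
  | append_singleton es x ih =>
    rw [List.foldl_append, List.foldl_cons, List.foldl_nil, items_ureStep, ih]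
    have eded : ded (es ++ [x]).reverse [] = x :: ded es.reverse [x.1] := by
      simp only [List.reverse_append, List.reverse_singleton, List.singleton_append]
      simp [ded]
    have c2 : List.filter (fun p => !(p.1 == x.1))
          ((ded es.reverse []).reverse.map (fun y => (y.1, y)))
        = (ded es.reverse [x.1]).reverse.map (fun y => (y.1, y)) := by
      rw [List.filter_map, List.filter_reverse, ded_add]
      rfl
    rw [List.filter_append, c2, eded, List.reverse_cons]
    simp only [List.map_append, List.map_cons, List.map_nil, List.filter_filter,
      List.append_assoc]
    congr 1
    apply List.filter_congr
    intro p _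
    by_cases h1 : p.1 = x.1 <;> by_cases h2 : p.1 ∈ List.map (fun x => x.1) es <;>
      simp [h1, h2]

theorem values_reverse_eq (events : List (Int × Int × Int)) :
    (List.foldl ureStep PySem.Dict.empty events).values.reverse
      = ded events.reverse [] := by
  rw [PySem.Dict.values, foldl_ureStep_items]
  have hid : ((fun x : ℤ × ℤ × ℤ × ℤ => x.2) ∘ fun y : ℤ × ℤ × ℤ => (y.1, y)) = id := rfl
  simp [PySem.Dict.empty, hid]

-- ===== VERDICT (by name: the statement is the Claim_ definition above) =====
theorem unique_recent_events_spec : Claim_unchanged_unique_recent_events := by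
  intro events limit _ hnd
  show unique_recent_events events limit = unique_recent_events_alt events limit
  unfold unique_recent_events unique_recent_events_alt
  rw [ureLoop_eq, ureTake_eq, values_reverse_eq]
  rw [show PySem.Set.empty = ([] : List Int) from rfl]
  rcases List.eq_nil_or_concat events with he | ⟨_, _, rfl⟩
  · subst he; simp [ded]
  · have hlim : 1 ≤ limit := by
      by_contra h
      exact hnd ⟨by simp, by omega⟩
    have h2 : max 1 limit = limit := by omega
    simp [h2]

theorem unique_recent_events_changed : Claim_changed_unique_recent_events := by
  unfold Claim_changed_unique_recent_events; decide

theorem unique_recent_events_tight : Claim_exact_unique_recent_events := by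
  intro events limit _ hd
  obtain ⟨hne, hlim⟩ := hd
  unfold unique_recent_events unique_recent_events_alt
  rw [ureLoop_eq, ureTake_eq, values_reverse_eq]
  have hrev : events.reverse ≠ [] := by simpa using hne
  obtain ⟨y, rest, hy⟩ := List.exists_cons_of_ne_nil hrev
  have hA : ∃ z l, ded events.reverse [] = z :: l := by
    rw [hy]
    exact ⟨y, ded rest [y.1], by simp [ded]⟩
  obtain ⟨z, l, hz⟩ := hA
  rw [show PySem.Set.empty = ([] : List Int) from rfl, hz]
  simp
  omega
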